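-- pv_equiv track=rewrite | github.com/ali4lou/Redefining-Housekeeping-Genes | result_codes/new_pleio_forms.py | find_ancestors
-- ===== SOURCE A (Python) =====
-- def find_ancestors(reverse_graph, term):
--     ancestors = set()
--     stack = [term]
--     while stack:
--         node = stack.pop()
--         for parent in reverse_graph[node]:
--             if parent not in ancestors:
--                 ancestors.add(parent)
--                 stack.append(parent)
--     return ancestors
-- ===== SOURCE B (Python) =====
-- def find_ancestors(reverse_graph, term):
--     def go(todo, anc):
--         if not todo:
--             return anc
--         node, rest = todo[0], todo[1:]
--         fresh = []
--         for p in reverse_graph[node]: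
--             if p not in anc and p not in fresh:
--                 fresh.append(p)
--         return go(list(reversed(fresh)) + rest, anc + fresh)
--     return set(go([term], []))
-- ===== Notes on version B (the rewrite author's own statement) =====
-- stated objective: alternative
-- what changed: Replaces the in-place while/stack loop over a mutable set with a pure recursive worklist: the stack top lives at the list head, each node's unseen parents are collected as one deduplicated batch, and accumulator and worklist advance by concatenation instead of mutation.
import Mathlib
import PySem

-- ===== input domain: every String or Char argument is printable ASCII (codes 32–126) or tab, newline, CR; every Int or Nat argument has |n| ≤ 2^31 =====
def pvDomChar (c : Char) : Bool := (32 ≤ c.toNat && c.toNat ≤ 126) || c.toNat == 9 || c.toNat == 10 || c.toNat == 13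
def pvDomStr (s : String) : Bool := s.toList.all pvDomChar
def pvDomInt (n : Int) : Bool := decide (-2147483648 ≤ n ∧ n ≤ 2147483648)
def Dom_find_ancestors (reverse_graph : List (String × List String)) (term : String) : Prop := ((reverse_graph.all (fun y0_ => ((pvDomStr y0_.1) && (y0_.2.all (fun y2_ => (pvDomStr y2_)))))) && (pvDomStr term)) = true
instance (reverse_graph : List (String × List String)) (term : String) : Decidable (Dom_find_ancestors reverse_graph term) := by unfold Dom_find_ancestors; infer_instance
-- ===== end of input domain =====

-- B rewrites A's in-place while/stack loop as a pure recursive worklist (top at the head,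
-- per-node batch of unseen parents, concatenation instead of mutation); same return value.

-- ===== PORT A =====
-- while-loop ported as fuel recursion; fuel = (total number of listed parents) + 1 bounds the
-- number of pops (1 + #distinct pushed parents), so it never runs out on Python's executions.
-- reverse_graph[node] on a missing key raises KeyError in Python: excluded by Pre_ below
-- (the port uses getD [] there; the claim only covers Pre_).
def goA (rg : List (String × List String)) : Nat → PySem.Set String → List String → PySem.Set String
  | 0, anc, _ => anc
  | _ + 1, anc, [] => anc
  | fuel + 1, anc, x :: xs =>
      let node := (x :: xs).getLast (List.cons_ne_nil x xs)   -- node = stack.pop()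
      let rest := (x :: xs).dropLast
      let st := (PySem.Dict.getD (PySem.Dict.mk rg) node []).foldl
        (fun (as : PySem.Set String × List String) p =>
          if PySem.Set.contains as.1 p then as
          else (PySem.Set.add as.1 p, as.2 ++ [p])) (anc, rest)
      goA rg fuel st.1 st.2

def find_ancestors (reverse_graph : List (String × List String)) (term : String) : List String :=
  goA reverse_graph ((PySem.Dict.values (PySem.Dict.mk reverse_graph)).flatten.length + 1) PySem.Set.empty [term]

-- ===== PORT B =====
-- same fuel bound as above (one unit per processed worklist node)
def goB (rg : List (String × List String)) : Nat → List String → List String → List String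
  | 0, _, anc => anc
  | _ + 1, [], anc => anc
  | fuel + 1, node :: rest, anc =>
      let fresh := (PySem.Dict.getD (PySem.Dict.mk rg) node []).foldl
        (fun f p => if anc.contains p || f.contains p then f else f ++ [p]) []
      goB rg fuel (fresh.reverse ++ rest) (anc ++ fresh)

def find_ancestors_alt (reverse_graph : List (String × List String)) (term : String) : List String :=
  PySem.Set.ofList (goB reverse_graph ((PySem.Dict.values (PySem.Dict.mk reverse_graph)).flatten.length + 1) [term] [])

-- ===== PRECONDITION & SPEC =====
-- one saturation step of the parent relation restricted to keys: add every parent listed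
-- under any node already in the set (a missing node contributes nothing)
def pvStep (rg : List (String × List String)) (s : List String) : List String :=
  s.foldl (fun acc n => (PySem.Dict.getD (PySem.Dict.mk rg) n []).foldl
    (fun a p => if a.contains p then a else a ++ [p]) acc) s

-- the closure of {term} under "parent of": exactly the nodes Python looks up in reverse_graph
def pvReach (rg : List (String × List String)) (term : String) : List String :=
  (pvStep rg)^[rg.length + 1] [term]

-- Pre_ excludes exactly the inputs on which A raises KeyError: it holds iff every node
-- reachable from term through the parent relation (the nodes A actually looks up) is a key.
def Pre_find_ancestors (reverse_graph : List (String × List String)) (term : String) : Prop :=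
  ((pvReach reverse_graph term).all
    (fun n => PySem.Dict.contains (PySem.Dict.mk reverse_graph) n)) = true
instance (reverse_graph : List (String × List String)) (term : String) : Decidable (Pre_find_ancestors reverse_graph term) := by unfold Pre_find_ancestors; infer_instance

def pvWitness_find_ancestors : (List (String × List String)) × String :=
  ([("t", ["a"]), ("a", [])], "t")

def Spec_find_ancestors (reverse_graph : List (String × List String)) (term : String) (out : List String) : Prop := out = find_ancestors_alt reverse_graph term
instance (reverse_graph : List (String × List String)) (term : String) (out : List String) : Decidable (Spec_find_ancestors reverse_graph term out) := by unfold Spec_find_ancestors; infer_instance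

-- ===== CLAIM (what is proved, stated in full; the proofs are below) =====
def Claim_equal_find_ancestors : Prop := ∀ (reverse_graph : List (String × List String)) (term : String), Dom_find_ancestors reverse_graph term → Pre_find_ancestors reverse_graph term → Spec_find_ancestors reverse_graph term (find_ancestors reverse_graph term)

-- ===== LEMMAS AND PROOFS =====

-- A's inner for-loop equals "append B's fresh batch to both components"
theorem foldA_eq (parents : List String) :
    ∀ (anc f s : List String),
    parents.foldl
      (fun (as : PySem.Set String × List String) p =>
        if PySem.Set.contains as.1 p then as
        else (PySem.Set.add as.1 p, as.2 ++ [p])) (anc ++ f, s ++ f)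
    = (anc ++ parents.foldl (fun f p => if anc.contains p || f.contains p then f else f ++ [p]) f,
       s ++ parents.foldl (fun f p => if anc.contains p || f.contains p then f else f ++ [p]) f) := by
  induction parents with
  | nil => intro anc f s; simp
  | cons p ps ih =>
    intro anc f s
    have hc : PySem.Set.contains (anc ++ f) p = (anc.contains p || f.contains p) := by
      simp [PySem.Set.contains]
    simp only [List.foldl_cons, hc]
    by_cases h : (anc.contains p || f.contains p) = true
    · simp only [h, if_true]
      exact ih anc f s
    · have hadd : PySem.Set.add (anc ++ f) p = anc ++ (f ++ [p]) := by
        simp only [PySem.Set.add, hc, h, Bool.false_eq_true, if_false, List.append_assoc]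
      simp only [h, Bool.false_eq_true, if_false, hadd, ← List.append_assoc]
      have := ih anc (f ++ [p]) s
      simpa [← List.append_assoc] using this

-- main invariant: B's worklist is A's stack reversed
theorem goA_eq_goB (rg : List (String × List String)) :
    ∀ (fuel : Nat) (anc stack : List String),
    goA rg fuel anc stack = goB rg fuel stack.reverse anc := by
  intro fuel
  induction fuel with
  | zero => intro anc stack; cases stack <;> simp [goA, goB]
  | succ n ih =>
    intro anc stack
    cases hst : stack with
    | nil => simp [goA, goB]
    | cons x xs =>
      have hsplit : x :: xs = (x :: xs).dropLast ++ [(x :: xs).getLast (List.cons_ne_nil x xs)] :=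
        (List.dropLast_append_getLast (List.cons_ne_nil x xs)).symm
      have hrev : (x :: xs).reverse
          = (x :: xs).getLast (List.cons_ne_nil x xs) :: ((x :: xs).dropLast).reverse := by
        conv_lhs => rw [hsplit]
        simp
      rw [goA, hrev, goB]
      have hfold := foldA_eq (PySem.Dict.getD (PySem.Dict.mk rg) ((x :: xs).getLast (List.cons_ne_nil x xs)) [])
        anc [] ((x :: xs).dropLast)
      simp only [List.append_nil] at hfold
      simp only [hfold, ih, List.reverse_append]

-- B's accumulator stays duplicate-free
theorem foldB_nodup (parents : List String) :
    ∀ (anc f : List String), (anc ++ f).Nodup →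
    (anc ++ parents.foldl (fun f p => if anc.contains p || f.contains p then f else f ++ [p]) f).Nodup := by
  induction parents with
  | nil => intro anc f h; simpa using h
  | cons p ps ih =>
    intro anc f h
    simp only [List.foldl_cons]
    by_cases hc : (anc.contains p || f.contains p) = true
    · simp only [hc, if_true]; exact ih anc f h
    · simp only [hc, Bool.false_eq_true, if_false]
      have hp : p ∉ anc ++ f := by
        simp only [Bool.or_eq_true] at hc
        simp only [List.mem_append]
        intro hmem
        rcases hmem with hm | hm
        · exact hc (Or.inl (by simpa using hm))
        · exact hc (Or.inr (by simpa using hm))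
      have hnd : (anc ++ (f ++ [p])).Nodup := by
        rw [← List.append_assoc]
        exact List.Nodup.append h (by simp) (by simpa using hp)
      exact ih anc (f ++ [p]) hnd

theorem goB_nodup (rg : List (String × List String)) :
    ∀ (fuel : Nat) (todo anc : List String), anc.Nodup → (goB rg fuel todo anc).Nodup := by
  intro fuel
  induction fuel with
  | zero => intro todo anc h; cases todo <;> simpa [goB] using h
  | succ n ih =>
    intro todo anc h
    cases todo with
    | nil => simpa [goB] using h
    | cons node rest =>
      rw [goB]
      apply ih
      have := foldB_nodup (PySem.Dict.getD (PySem.Dict.mk rg) node []) anc [] (by simpa using h)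
      simpa using this

-- ===== VERDICT (by name: the statement is the Claim_ definition above) =====
theorem find_ancestors_spec : Claim_equal_find_ancestors := by
  intro rg term _ _
  unfold Spec_find_ancestors find_ancestors find_ancestors_alt
  rw [show PySem.Set.empty = ([] : List String) from rfl, goA_eq_goB]
  have h : (goB rg ((PySem.Dict.values (PySem.Dict.mk rg)).flatten.length + 1) [term] []).Nodup :=
    goB_nodup rg _ _ _ (by simp)
  simp only [List.reverse_cons, List.reverse_nil, List.nil_append]
  exact (PySem.Set.ofList_eq_self_of_nodup _ h).symm
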